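-- pv_equiv track=rewrite | github.com/shashidharybhat/GSB_Meet | Meet_Parser.py | mistypes
-- ===== SOURCE A (Python) =====
-- def mistypes(types):
--     keywords = {"mitr":["mitr", "mirt", "mitra", "mithra", "mithr"], "saathi":["saathi","saatih", "saahti", "satahi", "saathi", "asathi"], "developer club":
-- ["developers  club", "developer club", "developerclub", "developer clbu", "developer culb", "developer lcub", "developerc lub", "develope rclub", "developre club", "develoepr club", "develpoer club", "deveolper club", "devleoper club", "deevloper club", "dveeloper club", "edveloper club","dev club", "dev clbu", "dev culb", "dev lcub", "devc lub", "de vclub", "dve club", "edv club" ], "editorial":["editoria", "editoril", "edtorial", "editoial", "editrial", "ediorial", "edtorial", "eitorial", "ditorial", "editorila", "editorail", "editoiral", "editroial", "ediotrial", "edtiorial", "eidtorial", "deitorial"], "blog":["blogg", "bloog", "bllog", "bblog", "blgo", "bolg", "lbog"], "gdsc":["gdcs", "gsdc", "dgsc"], "regional":["regiona", "regionl", "regioal", "reginal", "regonal", "reional", "rgional", "egional", "regionall", "regionaal", "regionnal", "regioonal", "regiional", "reggional", "reegional", "rregional", "regionla", "regioanl", "reginoal", "regoinal", "reigonal", "rgeional",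 "ergional"], "trv":["trivikra", "trivikrm", "tivikram", "triviram", "trvikram", "triikram", "trvikram", "tivikram", "rivikram", "trivikrma", "trivikarm", "trivirkam", "trivkiram", "triivkram", "trviikram", "tirvikram", "rtivikram", "tvr", "rtv"], "ashwin":["ashwi", "ashwn", "ashin", "aswin", "ahwin", "shwin", "ashwni", "ashiwn", "aswhin", "ahswin", "sahwin", "ash"], "vue": ["veu", "view", "vvu"], "placement":["placement", "placemen", "placemet", "placment", "placeent", "placment", "plaement", "plcement", "pacement", "lacement", "placemetn", "placemnet", "placeemnt", "placmeent", "plaecment", "plcaement", "palcement", "lpacement", "placements"], "ds":["ds", "bs"], "entrepreneurship": ["entrepeneurship","entrepreneur","entepreneur", "entreprener", "ntrepreneur", "etrepreneur", "ntrepreneur", "entepreneur", "entrereneur", "ntrepreneur", "entepreneur", "enrepreneur", "etrepreneur", "ntrepreneur", "entrepreneru", "entreprenuer", "entrepreenur", "entreprneeur", "entreperneur", "entrerpeneur", "entrpereneur", "enterpreneur", "enrtepreneur", "etnrepreneur", "netrepreneur", "ecell","e-cell"]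
--  }
--     for i,k in keywords.items():
--         if types in k:
--             return i.title()
--     return None
-- ===== SOURCE B (Python) =====
-- # Flat precomputed (typo, category) pairs; a reverse-lookup dict is built once
-- # at module load (setdefault: the first category for a typo wins, as in the
-- # original insertion-order scan); each call is a single dict lookup.
-- _PAIRS = [
--     ('mitr', 'mitr'),
--     ('mirt', 'mitr'),
--     ('mitra', 'mitr'),
--     ('mithra', 'mitr'),
--     ('mithr', 'mitr'),
--     ('saathi', 'saathi'),
--     ('saatih', 'saathi'),
--     ('saahti', 'saathi'),
--     ('satahi', 'saathi'),
--     ('saathi', 'saathi'),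
--     ('asathi', 'saathi'),
--     ('developers  club', 'developer club'),
--     ('developer club', 'developer club'),
--     ('developerclub', 'developer club'),
--     ('developer clbu', 'developer club'),
--     ('developer culb', 'developer club'),
--     ('developer lcub', 'developer club'),
--     ('developerc lub', 'developer club'),
--     ('develope rclub', 'developer club'),
--     ('developre club', 'developer club'),
--     ('develoepr club', 'developer club'),
--     ('develpoer club', 'developer club'),
--     ('deveolper club', 'developer club'),
--     ('devleoper club', 'developer club'),
--     ('deevloper club', 'developer club'),
--     ('dveeloper club', 'developer club'),
--     ('edveloper club', 'developer club'),
--     ('dev club', 'developer club'),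
--     ('dev clbu', 'developer club'),
--     ('dev culb', 'developer club'),
--     ('dev lcub', 'developer club'),
--     ('devc lub', 'developer club'),
--     ('de vclub', 'developer club'),
--     ('dve club', 'developer club'),
--     ('edv club', 'developer club'),
--     ('editoria', 'editorial'),
--     ('editoril', 'editorial'),
--     ('edtorial', 'editorial'),
--     ('editoial', 'editorial'),
--     ('editrial', 'editorial'),
--     ('ediorial', 'editorial'),
--     ('edtorial', 'editorial'),
--     ('eitorial', 'editorial'),
--     ('ditorial', 'editorial'),
--     ('editorila', 'editorial'),
--     ('editorail', 'editorial'),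
--     ('editoiral', 'editorial'),
--     ('editroial', 'editorial'),
--     ('ediotrial', 'editorial'),
--     ('edtiorial', 'editorial'),
--     ('eidtorial', 'editorial'),
--     ('deitorial', 'editorial'),
--     ('blogg', 'blog'),
--     ('bloog', 'blog'),
--     ('bllog', 'blog'),
--     ('bblog', 'blog'),
--     ('blgo', 'blog'),
--     ('bolg', 'blog'),
--     ('lbog', 'blog'),
--     ('gdcs', 'gdsc'),
--     ('gsdc', 'gdsc'),
--     ('dgsc', 'gdsc'),
--     ('regiona', 'regional'),
--     ('regionl', 'regional'),
--     ('regioal', 'regional'),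
--     ('reginal', 'regional'),
--     ('regonal', 'regional'),
--     ('reional', 'regional'),
--     ('rgional', 'regional'),
--     ('egional', 'regional'),
--     ('regionall', 'regional'),
--     ('regionaal', 'regional'),
--     ('regionnal', 'regional'),
--     ('regioonal', 'regional'),
--     ('regiional', 'regional'),
--     ('reggional', 'regional'),
--     ('reegional', 'regional'),
--     ('rregional', 'regional'),
--     ('regionla', 'regional'),
--     ('regioanl', 'regional'),
--     ('reginoal', 'regional'),
--     ('regoinal', 'regional'),
--     ('reigonal', 'regional'),
--     ('rgeional', 'regional'),
--     ('ergional', 'regional'),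
--     ('trivikra', 'trv'),
--     ('trivikrm', 'trv'),
--     ('tivikram', 'trv'),
--     ('triviram', 'trv'),
--     ('trvikram', 'trv'),
--     ('triikram', 'trv'),
--     ('trvikram', 'trv'),
--     ('tivikram', 'trv'),
--     ('rivikram', 'trv'),
--     ('trivikrma', 'trv'),
--     ('trivikarm', 'trv'),
--     ('trivirkam', 'trv'),
--     ('trivkiram', 'trv'),
--     ('triivkram', 'trv'),
--     ('trviikram', 'trv'),
--     ('tirvikram', 'trv'),
--     ('rtivikram', 'trv'),
--     ('tvr', 'trv'),
--     ('rtv', 'trv'),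
--     ('ashwi', 'ashwin'),
--     ('ashwn', 'ashwin'),
--     ('ashin', 'ashwin'),
--     ('aswin', 'ashwin'),
--     ('ahwin', 'ashwin'),
--     ('shwin', 'ashwin'),
--     ('ashwni', 'ashwin'),
--     ('ashiwn', 'ashwin'),
--     ('aswhin', 'ashwin'),
--     ('ahswin', 'ashwin'),
--     ('sahwin', 'ashwin'),
--     ('ash', 'ashwin'),
--     ('veu', 'vue'),
--     ('view', 'vue'),
--     ('vvu', 'vue'),
--     ('placement', 'placement'),
--     ('placemen', 'placement'),
--     ('placemet', 'placement'),
--     ('placment', 'placement'),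
--     ('placeent', 'placement'),
--     ('placment', 'placement'),
--     ('plaement', 'placement'),
--     ('plcement', 'placement'),
--     ('pacement', 'placement'),
--     ('lacement', 'placement'),
--     ('placemetn', 'placement'),
--     ('placemnet', 'placement'),
--     ('placeemnt', 'placement'),
--     ('placmeent', 'placement'),
--     ('plaecment', 'placement'),
--     ('plcaement', 'placement'),
--     ('palcement', 'placement'),
--     ('lpacement', 'placement'),
--     ('placements', 'placement'),
--     ('ds', 'ds'),
--     ('bs', 'ds'),
--     ('entrepeneurship', 'entrepreneurship'),
--     ('entrepreneur', 'entrepreneurship'),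
--     ('entepreneur', 'entrepreneurship'),
--     ('entreprener', 'entrepreneurship'),
--     ('ntrepreneur', 'entrepreneurship'),
--     ('etrepreneur', 'entrepreneurship'),
--     ('ntrepreneur', 'entrepreneurship'),
--     ('entepreneur', 'entrepreneurship'),
--     ('entrereneur', 'entrepreneurship'),
--     ('ntrepreneur', 'entrepreneurship'),
--     ('entepreneur', 'entrepreneurship'),
--     ('enrepreneur', 'entrepreneurship'),
--     ('etrepreneur', 'entrepreneurship'),
--     ('ntrepreneur', 'entrepreneurship'),
--     ('entrepreneru', 'entrepreneurship'),
--     ('entreprenuer', 'entrepreneurship'),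
--     ('entrepreenur', 'entrepreneurship'),
--     ('entreprneeur', 'entrepreneurship'),
--     ('entreperneur', 'entrepreneurship'),
--     ('entrerpeneur', 'entrepreneurship'),
--     ('entrpereneur', 'entrepreneurship'),
--     ('enterpreneur', 'entrepreneurship'),
--     ('enrtepreneur', 'entrepreneurship'),
--     ('etnrepreneur', 'entrepreneurship'),
--     ('netrepreneur', 'entrepreneurship'),
--     ('ecell', 'entrepreneurship'),
--     ('e-cell', 'entrepreneurship'),
-- ]
--
-- _INDEX = {}
-- for _t, _c in _PAIRS:
--     _INDEX.setdefault(_t, _c.title())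
--
--
-- def mistypes(types):
--     return _INDEX.get(types)
-- ===== Notes on version B (the rewrite author's own statement) =====
-- stated objective: alternative
-- what changed: B flattens the keyword dict into a (typo, category) pair table and folds it once at module load into a reverse-lookup dict via setdefault (first category wins, matching A's insertion-order scan); each call is then a single dict lookup instead of A's scan over every keyword list.
import Mathlib
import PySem

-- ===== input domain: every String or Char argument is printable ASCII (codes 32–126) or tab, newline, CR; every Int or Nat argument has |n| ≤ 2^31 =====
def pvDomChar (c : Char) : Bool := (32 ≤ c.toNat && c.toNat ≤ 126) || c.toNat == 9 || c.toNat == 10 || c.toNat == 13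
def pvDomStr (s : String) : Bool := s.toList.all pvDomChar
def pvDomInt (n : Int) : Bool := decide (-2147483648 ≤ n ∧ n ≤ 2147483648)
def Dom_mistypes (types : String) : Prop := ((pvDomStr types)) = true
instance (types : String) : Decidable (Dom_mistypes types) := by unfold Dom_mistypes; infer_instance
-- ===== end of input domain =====

-- B replaces A's per-call scan over the keyword dict's lists by a flat
-- (typo, category) pair table folded once into a reverse-lookup dict
-- (setdefault: first category wins); a call is then one dict lookup.
-- Objective: alternative (different data structure and traversal).

-- hand port of Python str.title() (exact on ASCII: a letter following a
-- non-letter is uppercased, other letters lowercased, non-letters kept)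
def pyTitleAux : Bool → List Char → List Char
  | _, [] => []
  | prev, c :: cs =>
    (if c.isAlpha then (if prev then c.toLower else c.toUpper) else c) :: pyTitleAux c.isAlpha cs

def pyTitle (s : String) : String := String.ofList (pyTitleAux false s.toList)

-- ===== PORT A =====
-- A's dict literal
def kwData : List (String × List String) := [
  ("mitr", ["mitr", "mirt", "mitra", "mithra", "mithr"]),
  ("saathi", ["saathi", "saatih", "saahti", "satahi", "saathi", "asathi"]),
  ("developer club", ["developers  club", "developer club", "developerclub", "developer clbu", "developer culb", "developer lcub", "developerc lub", "develope rclub", "developre club", "develoepr club", "develpoer club", "deveolper club", "devleoper club", "deevloper club", "dveeloper club", "edveloper club", "dev club", "dev clbu", "dev culb", "dev lcub", "devc lub", "de vclub", "dve club", "edv club"]),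
  ("editorial", ["editoria", "editoril", "edtorial", "editoial", "editrial", "ediorial", "edtorial", "eitorial", "ditorial", "editorila", "editorail", "editoiral", "editroial", "ediotrial", "edtiorial", "eidtorial", "deitorial"]),
  ("blog", ["blogg", "bloog", "bllog", "bblog", "blgo", "bolg", "lbog"]),
  ("gdsc", ["gdcs", "gsdc", "dgsc"]),
  ("regional", ["regiona", "regionl", "regioal", "reginal", "regonal", "reional", "rgional", "egional", "regionall", "regionaal", "regionnal", "regioonal", "regiional", "reggional", "reegional", "rregional", "regionla", "regioanl", "reginoal", "regoinal", "reigonal", "rgeional", "ergional"]),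
  ("trv", ["trivikra", "trivikrm", "tivikram", "triviram", "trvikram", "triikram", "trvikram", "tivikram", "rivikram", "trivikrma", "trivikarm", "trivirkam", "trivkiram", "triivkram", "trviikram", "tirvikram", "rtivikram", "tvr", "rtv"]),
  ("ashwin", ["ashwi", "ashwn", "ashin", "aswin", "ahwin", "shwin", "ashwni", "ashiwn", "aswhin", "ahswin", "sahwin", "ash"]),
  ("vue", ["veu", "view", "vvu"]),
  ("placement", ["placement", "placemen", "placemet", "placment", "placeent", "placment", "plaement", "plcement", "pacement", "lacement", "placemetn", "placemnet", "placeemnt", "placmeent", "plaecment", "plcaement", "palcement", "lpacement", "placements"]),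
  ("ds", ["ds", "bs"]),
  ("entrepreneurship", ["entrepeneurship", "entrepreneur", "entepreneur", "entreprener", "ntrepreneur", "etrepreneur", "ntrepreneur", "entepreneur", "entrereneur", "ntrepreneur", "entepreneur", "enrepreneur", "etrepreneur", "ntrepreneur", "entrepreneru", "entreprenuer", "entrepreenur", "entreprneeur", "entreperneur", "entrerpeneur", "entrpereneur", "enterpreneur", "enrtepreneur", "etnrepreneur", "netrepreneur", "ecell", "e-cell"])]

-- the for-loop over keywords.items() with early return
def scanA (types : String) : List (String × List String) → Option String
  | [] => none
  | (i, k) :: rest => if types ∈ k then some (pyTitle i) else scanA types rest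

def mistypes (types : String) : Option String := scanA types kwData

-- ===== PORT B =====
-- B's flat table literal: (typo, category) pairs in the original order
def bPairs : List (String × String) := [
  ("mitr", "mitr"),
  ("mirt", "mitr"),
  ("mitra", "mitr"),
  ("mithra", "mitr"),
  ("mithr", "mitr"),
  ("saathi", "saathi"),
  ("saatih", "saathi"),
  ("saahti", "saathi"),
  ("satahi", "saathi"),
  ("saathi", "saathi"),
  ("asathi", "saathi"),
  ("developers  club", "developer club"),
  ("developer club", "developer club"),
  ("developerclub", "developer club"),
  ("developer clbu", "developer club"),
  ("developer culb", "developer club"),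
  ("developer lcub", "developer club"),
  ("developerc lub", "developer club"),
  ("develope rclub", "developer club"),
  ("developre club", "developer club"),
  ("develoepr club", "developer club"),
  ("develpoer club", "developer club"),
  ("deveolper club", "developer club"),
  ("devleoper club", "developer club"),
  ("deevloper club", "developer club"),
  ("dveeloper club", "developer club"),
  ("edveloper club", "developer club"),
  ("dev club", "developer club"),
  ("dev clbu", "developer club"),
  ("dev culb", "developer club"),
  ("dev lcub", "developer club"),
  ("devc lub", "developer club"),
  ("de vclub", "developer club"),
  ("dve club", "developer club"),
  ("edv club", "developer club"),
  ("editoria", "editorial"),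
  ("editoril", "editorial"),
  ("edtorial", "editorial"),
  ("editoial", "editorial"),
  ("editrial", "editorial"),
  ("ediorial", "editorial"),
  ("edtorial", "editorial"),
  ("eitorial", "editorial"),
  ("ditorial", "editorial"),
  ("editorila", "editorial"),
  ("editorail", "editorial"),
  ("editoiral", "editorial"),
  ("editroial", "editorial"),
  ("ediotrial", "editorial"),
  ("edtiorial", "editorial"),
  ("eidtorial", "editorial"),
  ("deitorial", "editorial"),
  ("blogg", "blog"),
  ("bloog", "blog"),
  ("bllog", "blog"),
  ("bblog", "blog"),
  ("blgo", "blog"),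
  ("bolg", "blog"),
  ("lbog", "blog"),
  ("gdcs", "gdsc"),
  ("gsdc", "gdsc"),
  ("dgsc", "gdsc"),
  ("regiona", "regional"),
  ("regionl", "regional"),
  ("regioal", "regional"),
  ("reginal", "regional"),
  ("regonal", "regional"),
  ("reional", "regional"),
  ("rgional", "regional"),
  ("egional", "regional"),
  ("regionall", "regional"),
  ("regionaal", "regional"),
  ("regionnal", "regional"),
  ("regioonal", "regional"),
  ("regiional", "regional"),
  ("reggional", "regional"),
  ("reegional", "regional"),
  ("rregional", "regional"),
  ("regionla", "regional"),
  ("regioanl", "regional"),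
  ("reginoal", "regional"),
  ("regoinal", "regional"),
  ("reigonal", "regional"),
  ("rgeional", "regional"),
  ("ergional", "regional"),
  ("trivikra", "trv"),
  ("trivikrm", "trv"),
  ("tivikram", "trv"),
  ("triviram", "trv"),
  ("trvikram", "trv"),
  ("triikram", "trv"),
  ("trvikram", "trv"),
  ("tivikram", "trv"),
  ("rivikram", "trv"),
  ("trivikrma", "trv"),
  ("trivikarm", "trv"),
  ("trivirkam", "trv"),
  ("trivkiram", "trv"),
  ("triivkram", "trv"),
  ("trviikram", "trv"),
  ("tirvikram", "trv"),
  ("rtivikram", "trv"),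
  ("tvr", "trv"),
  ("rtv", "trv"),
  ("ashwi", "ashwin"),
  ("ashwn", "ashwin"),
  ("ashin", "ashwin"),
  ("aswin", "ashwin"),
  ("ahwin", "ashwin"),
  ("shwin", "ashwin"),
  ("ashwni", "ashwin"),
  ("ashiwn", "ashwin"),
  ("aswhin", "ashwin"),
  ("ahswin", "ashwin"),
  ("sahwin", "ashwin"),
  ("ash", "ashwin"),
  ("veu", "vue"),
  ("view", "vue"),
  ("vvu", "vue"),
  ("placement", "placement"),
  ("placemen", "placement"),
  ("placemet", "placement"),
  ("placment", "placement"),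
  ("placeent", "placement"),
  ("placment", "placement"),
  ("plaement", "placement"),
  ("plcement", "placement"),
  ("pacement", "placement"),
  ("lacement", "placement"),
  ("placemetn", "placement"),
  ("placemnet", "placement"),
  ("placeemnt", "placement"),
  ("placmeent", "placement"),
  ("plaecment", "placement"),
  ("plcaement", "placement"),
  ("palcement", "placement"),
  ("lpacement", "placement"),
  ("placements", "placement"),
  ("ds", "ds"),
  ("bs", "ds"),
  ("entrepeneurship", "entrepreneurship"),
  ("entrepreneur", "entrepreneurship"),
  ("entepreneur", "entrepreneurship"),
  ("entreprener", "entrepreneurship"),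
  ("ntrepreneur", "entrepreneurship"),
  ("etrepreneur", "entrepreneurship"),
  ("ntrepreneur", "entrepreneurship"),
  ("entepreneur", "entrepreneurship"),
  ("entrereneur", "entrepreneurship"),
  ("ntrepreneur", "entrepreneurship"),
  ("entepreneur", "entrepreneurship"),
  ("enrepreneur", "entrepreneurship"),
  ("etrepreneur", "entrepreneurship"),
  ("ntrepreneur", "entrepreneurship"),
  ("entrepreneru", "entrepreneurship"),
  ("entreprenuer", "entrepreneurship"),
  ("entrepreenur", "entrepreneurship"),
  ("entreprneeur", "entrepreneurship"),
  ("entreperneur", "entrepreneurship"),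
  ("entrerpeneur", "entrepreneurship"),
  ("entrpereneur", "entrepreneurship"),
  ("enterpreneur", "entrepreneurship"),
  ("enrtepreneur", "entrepreneurship"),
  ("etnrepreneur", "entrepreneurship"),
  ("netrepreneur", "entrepreneurship"),
  ("ecell", "entrepreneurship"),
  ("e-cell", "entrepreneurship")]

-- for t, c in _PAIRS: _INDEX.setdefault(t, c.title())
def typoIndexB : PySem.Dict String String :=
  bPairs.foldl (fun d p => d.setdefault p.1 (pyTitle p.2)) PySem.Dict.empty

def mistypes_alt (types : String) : Option String := typoIndexB.get? types

-- ===== PRECONDITION & SPEC =====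
def Spec_mistypes (types : String) (out : Option String) : Prop := out = mistypes_alt types
instance (types : String) (out : Option String) : Decidable (Spec_mistypes types out) := by unfold Spec_mistypes; infer_instance

-- ===== CLAIM (what is proved, stated in full; the proofs are below) =====
def Claim_equal_mistypes : Prop := ∀ (types : String), Dom_mistypes types → Spec_mistypes types (mistypes types)

-- ===== LEMMAS AND PROOFS =====

-- first-match lookup over (typo, category) pairs, titling the category
def fm (t : String) : List (String × String) → Option String
  | [] => none
  | (x, c) :: rest => if x = t then some (pyTitle c) else fm t rest

-- bPairs is exactly kwData flattened (pure regrouping of the same literals)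
theorem flat_eq :
    kwData.flatMap (fun p => p.2.map (fun t => (t, p.1))) = bPairs := rfl

-- a setdefault fold looks up as first-match behind the accumulator
theorem get?_fold_setdefault (ps : List (String × String)) (d : PySem.Dict String String)
    (t : String) :
    (ps.foldl (fun d p => d.setdefault p.1 (pyTitle p.2)) d).get? t
      = ((d.get? t).orElse (fun _ => fm t ps)) := by
  induction ps generalizing d with
  | nil => cases h : d.get? t <;> simp [h, fm, Option.orElse]
  | cons p rest ih =>
    obtain ⟨x, c⟩ := p
    simp only [List.foldl_cons, ih, fm]
    by_cases hx : t = x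
    · subst hx
      rw [PySem.Dict.get?_setdefault_self]
      cases h : d.get? t <;> simp [Option.orElse]
    · rw [PySem.Dict.get?_setdefault_of_ne d (pyTitle c) hx]
      have hxt : ¬ x = t := fun h => hx h.symm
      cases h : d.get? t <;> simp [Option.orElse, hxt]

-- first-match over one flattened block is A's membership test
theorem fm_block (t c : String) (ts : List String) (rest : List (String × String)) :
    fm t (ts.map (fun x => (x, c)) ++ rest)
      = if t ∈ ts then some (pyTitle c) else fm t rest := by
  induction ts with
  | nil => simp
  | cons x xs ih =>
    by_cases hx : x = t
    · subst hx
      simp [fm, List.mem_cons]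
    · have hxt : ¬ t = x := fun h => hx h.symm
      simp only [List.map_cons, List.cons_append, fm, if_neg hx, ih, List.mem_cons]
      simp [hxt]

-- first-match over the whole flattened table is A's scan
theorem fm_flat (t : String) (kws : List (String × List String)) :
    fm t (kws.flatMap (fun p => p.2.map (fun x => (x, p.1)))) = scanA t kws := by
  induction kws with
  | nil => rfl
  | cons p rest ih =>
    obtain ⟨c, ts⟩ := p
    simp only [List.flatMap_cons, fm_block, scanA, ih]

-- ===== VERDICT (by name: the statement is the Claim_ definition above) =====
theorem mistypes_spec : Claim_equal_mistypes := by
  intro types _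
  unfold Spec_mistypes mistypes mistypes_alt typoIndexB
  rw [get?_fold_setdefault, ← flat_eq, ]
  simp [PySem.Dict.empty, Option.orElse, PySem.Dict.get?, fm_flat]
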